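-- pv_equiv track=rewrite | github.com/gbud/Fundamentals-of-CS-and-Programming | week11_midterm2/practice_midterm2.py | getAdjacentVals
-- ===== SOURCE A (Python) =====
-- def getAdjacentVals(L):
--     rows, cols = len(L), len(L[0])
--     result = dict()
--     for row in range(rows):
--         for col in range(cols):
--             num = L[row][col]
--             adjVals = getAdjacentValsHelper(L, row, col)
--             if num in result:
--                 for val in adjVals:
--                     result[num].add(val)
--             else: result[num] = adjVals
--     return result
--
-- def getAdjacentValsHelper(L, row, col):
--     adjVals = set()
--     dirs = [(-1,-1),(-1,0),(-1,1),(0,-1),(0,1),(1,-1),(1,0),(1,1)]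
--     for drow,dcol in dirs:
--         testRow, testCol = row+drow, col+dcol
--         if ((testRow < 0) or (testRow >= len(L)) or
--             (testCol < 0) or (testCol >= len(L[0]))):
--             continue
--         else:
--             val = L[testRow][testCol]
--             adjVals.add(val)
--     return adjVals
-- ===== SOURCE B (Python) =====
-- def getAdjacentVals(L):
--     cols = len(L[0])
--     result = {}
--     for above, row, below in zip([None] + L, L, L[1:] + [None]):
--         for c, num in enumerate(row[:cols]):
--             lo, hi = max(0, c - 1), min(cols, c + 2)
--             nbrs = []
--             if above is not None:
--                 nbrs += above[lo:hi]
--             nbrs += row[lo:c] + row[c + 1:hi]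
--             if below is not None:
--                 nbrs += below[lo:hi]
--             s = result.setdefault(num, set())
--             s.update(nbrs)
--     return result
-- ===== Notes on version B (the rewrite author's own statement) =====
-- stated objective: simpler
-- what changed: B drops A's 8-direction helper (offset list with four bounds checks per neighbour) and instead walks zipped shifted-row triples, gathering each cell's neighbours with clamped row slices, and replaces A's two-branch dict merge (add-loop vs fresh-set assignment) by a uniform setdefault + update.
import Mathlib
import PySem

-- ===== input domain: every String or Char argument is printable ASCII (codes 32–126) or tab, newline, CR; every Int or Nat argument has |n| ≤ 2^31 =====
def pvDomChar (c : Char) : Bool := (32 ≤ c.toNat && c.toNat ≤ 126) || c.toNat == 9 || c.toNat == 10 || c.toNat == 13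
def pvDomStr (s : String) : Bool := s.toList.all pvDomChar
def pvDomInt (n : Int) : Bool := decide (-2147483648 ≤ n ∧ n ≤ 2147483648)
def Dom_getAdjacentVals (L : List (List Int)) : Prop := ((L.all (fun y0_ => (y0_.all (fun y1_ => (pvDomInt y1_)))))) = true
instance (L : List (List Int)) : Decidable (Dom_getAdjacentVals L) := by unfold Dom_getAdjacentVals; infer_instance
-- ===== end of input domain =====

-- B replaces A's per-cell 8-direction helper (offset list + bounds checks) by a pass over
-- zipped shifted-row triples with clamped slices of the 3x3 window, and A's two-branch dict
-- merge by a uniform setdefault + update; objective: simpler, same asymptotic cost.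

-- ===== PORT A =====
def getAdjacentValsHelper (L : List (List Int)) (row col : Int) : PySem.Set Int :=
  let dirs : List (Int × Int) := [(-1,-1),(-1,0),(-1,1),(0,-1),(0,1),(1,-1),(1,0),(1,1)]
  dirs.foldl (fun adjVals d =>
    let testRow := row + d.1
    let testCol := col + d.2
    if testRow < 0 ∨ (L.length : Int) ≤ testRow ∨ testCol < 0 ∨ ((PySem.List.pyGetD L 0 []).length : Int) ≤ testCol
    then adjVals
    else PySem.Set.add adjVals (PySem.List.pyGetD (PySem.List.pyGetD L testRow []) testCol 0))
    PySem.Set.empty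

def getAdjacentVals (L : List (List Int)) : List (Int × List Int) :=
  let rows : Int := L.length
  let cols : Int := (PySem.List.pyGetD L 0 []).length
  let result : PySem.Dict Int (PySem.Set Int) :=
    (PySem.List.pyRange 0 rows 1).foldl (fun result row =>
      (PySem.List.pyRange 0 cols 1).foldl (fun result col =>
        let num := PySem.List.pyGetD (PySem.List.pyGetD L row []) col 0
        let adjVals := getAdjacentValsHelper L row col
        if result.contains num then
          result.modify num PySem.Set.empty (fun s => adjVals.foldl PySem.Set.add s)
        else result.insert num adjVals) result) PySem.Dict.empty
  result.items

-- ===== PORT B =====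
def getAdjacentVals_alt (L : List (List Int)) : List (Int × List Int) :=
  let cols : Int := (PySem.List.pyGetD L 0 []).length
  let rows3 := ((none :: L.map some).zip L).zip ((L.drop 1).map some ++ [none])
  let result : PySem.Dict Int (PySem.Set Int) :=
    rows3.foldl (fun result t =>
      let above := t.1.1
      let row := t.1.2
      let below := t.2
      (PySem.List.enumerate (PySem.List.slice row none (some cols))).foldl (fun result p =>
        let c := p.1
        let num := p.2
        let lo := max 0 (c - 1)
        let hi := min cols (c + 2)
        let nbrs :=
          (match above with | some a => PySem.List.slice a (some lo) (some hi) | none => [])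
          ++ PySem.List.slice row (some lo) (some c)
          ++ PySem.List.slice row (some (c + 1)) (some hi)
          ++ (match below with | some b => PySem.List.slice b (some lo) (some hi) | none => [])
        let result := result.setdefault num PySem.Set.empty
        result.modify num PySem.Set.empty (fun s => PySem.Set.update s nbrs)) result) PySem.Dict.empty
  result.items

-- ===== PRECONDITION & SPEC =====
-- Pre_ excludes exactly the inputs where Python A raises: the empty grid (len(L[0]) is an
-- IndexError) and grids where some row is shorter than the first row (L[row][col] raises).
def Pre_getAdjacentVals (L : List (List Int)) : Prop :=
  L ≠ [] ∧ ∀ row ∈ L, (L.headI).length ≤ row.length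
instance (L : List (List Int)) : Decidable (Pre_getAdjacentVals L) := by
  unfold Pre_getAdjacentVals; infer_instance

def pvWitness_getAdjacentVals : List (List Int) := [[1, 2], [3, 1]]

def Spec_getAdjacentVals (L : List (List Int)) (out : List (Int × List Int)) : Prop := out = getAdjacentVals_alt L
instance (L : List (List Int)) (out : List (Int × List Int)) : Decidable (Spec_getAdjacentVals L out) := by unfold Spec_getAdjacentVals; infer_instance

-- ===== CLAIM (what is proved, stated in full; the proofs are below) =====
def Claim_equal_getAdjacentVals : Prop := ∀ (L : List (List Int)), Dom_getAdjacentVals L → Pre_getAdjacentVals L → Spec_getAdjacentVals L (getAdjacentVals L)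

-- ===== LEMMAS AND PROOFS =====

-- value of cell (r, c)
def pvGet (L : List (List Int)) (r c : Int) : Int :=
  PySem.List.pyGetD (PySem.List.pyGetD L r []) c 0

-- B's neighbour list at cell (r, c), with above/below resolved through indexing
def pvNbrs (L : List (List Int)) (r c : Int) : List Int :=
  let cols : Int := (PySem.List.pyGetD L 0 []).length
  let lo := max 0 (c - 1)
  let hi := min cols (c + 2)
  (if 0 < r then PySem.List.slice (PySem.List.pyGetD L (r-1) []) (some lo) (some hi) else [])
  ++ PySem.List.slice (PySem.List.pyGetD L r []) (some lo) (some c)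
  ++ PySem.List.slice (PySem.List.pyGetD L r []) (some (c + 1)) (some hi)
  ++ (if r + 1 < (L.length : Int) then PySem.List.slice (PySem.List.pyGetD L (r+1) []) (some lo) (some hi) else [])

theorem pv_slice_win (xs : List Int) (a b : Int) (h0 : 0 ≤ a) (hab : a ≤ b)
    (hb : b.toNat ≤ xs.length) :
    PySem.List.slice xs (some a) (some b) =
      (PySem.List.pyRange a b 1).map (fun i => PySem.List.pyGetD xs i 0) := by
  rw [PySem.List.slice_toNat xs h0 (le_trans h0 hab), PySem.List.pyRange_one]
  apply List.ext_getElem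
  · simp only [List.length_take, List.length_drop, List.length_map, List.length_range]
    omega
  · intro i h1 h2
    simp only [List.length_take, List.length_drop] at h1
    simp only [List.getElem_take, List.getElem_drop, List.getElem_map, List.getElem_range]
    rw [PySem.List.pyGetD_eq_getElem _ _ (by omega) (by omega)]
    congr 1
    omega

theorem pv_win (xs : List Int) (cols c : Int) (hc0 : 0 ≤ c) (hcN : c < cols)
    (hlen : cols.toNat ≤ xs.length) :
    PySem.List.slice xs (some (max 0 (c-1))) (some (min cols (c+2))) =
      (if 0 < c then [PySem.List.pyGetD xs (c-1) 0] else [])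
      ++ [PySem.List.pyGetD xs c 0]
      ++ (if c+1 < cols then [PySem.List.pyGetD xs (c+1) 0] else []) := by
  by_cases h3 : 0 < c <;> by_cases h4 : c + 1 < cols
  · rw [max_eq_right (by omega), min_eq_right (by omega),
      pv_slice_win xs _ _ (by omega) (by omega) (by omega),
      PySem.List.pyRange_one, show c + 2 - (c - 1) = 3 by ring]
    simp [h3, h4, List.range_succ]
    ring_nf
  · obtain rfl : cols = c + 1 := by omega
    rw [max_eq_right (by omega), min_eq_left (by omega),
      pv_slice_win xs _ _ (by omega) (by omega) (by omega),
      PySem.List.pyRange_one, show c + 1 - (c - 1) = 2 by ring]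
    simp [h3, List.range_succ]
  · obtain rfl : c = 0 := by omega
    rw [max_eq_left (by omega), min_eq_right (by omega),
      pv_slice_win xs _ _ (by omega) (by omega) (by omega),
      PySem.List.pyRange_one]
    simp [List.range_succ]
    omega
  · obtain rfl : c = 0 := by omega
    obtain rfl : cols = 1 := by omega
    rw [max_eq_left (by omega), min_eq_left (by omega),
      pv_slice_win xs _ _ (by omega) (by omega) (by omega),
      PySem.List.pyRange_one]
    simp [List.range_succ]

theorem pv_left (xs : List Int) (cols c : Int) (hc0 : 0 ≤ c) (hcN : c < cols)
    (hlen : cols.toNat ≤ xs.length) :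
    PySem.List.slice xs (some (max 0 (c-1))) (some c) =
      (if 0 < c then [PySem.List.pyGetD xs (c-1) 0] else []) := by
  by_cases h3 : 0 < c
  · rw [max_eq_right (by omega),
      pv_slice_win xs _ _ (by omega) (by omega) (by omega),
      PySem.List.pyRange_one, show c - (c - 1) = 1 by ring]
    simp [h3, List.range_succ]
  · obtain rfl : c = 0 := by omega
    rw [max_eq_left (by omega),
      pv_slice_win xs _ _ (by omega) (by omega) (by omega),
      PySem.List.pyRange_one]
    simp

theorem pv_right (xs : List Int) (cols c : Int) (hc0 : 0 ≤ c) (hcN : c < cols)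
    (hlen : cols.toNat ≤ xs.length) :
    PySem.List.slice xs (some (c+1)) (some (min cols (c+2))) =
      (if c+1 < cols then [PySem.List.pyGetD xs (c+1) 0] else []) := by
  by_cases h4 : c + 1 < cols
  · rw [min_eq_right (by omega),
      pv_slice_win xs _ _ (by omega) (by omega) (by omega),
      PySem.List.pyRange_one, show c + 2 - (c + 1) = 1 by ring]
    simp [h4, List.range_succ]
  · obtain rfl : cols = c + 1 := by omega
    rw [min_eq_left (by omega),
      pv_slice_win xs _ _ (by omega) (by omega) (by omega),
      PySem.List.pyRange_one]
    simp

theorem pv_rowlen (L : List (List Int)) (hpre : Pre_getAdjacentVals L) (i : Int)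
    (h0 : 0 ≤ i) (h1 : i < (L.length : Int)) :
    (PySem.List.pyGetD L 0 []).length ≤ (PySem.List.pyGetD L i []).length := by
  obtain ⟨hne, hall⟩ := hpre
  have h0' : PySem.List.pyGetD L 0 [] = L.headI := by
    cases L with
    | nil => exact absurd rfl hne
    | cons a t =>
      rw [show (0:Int) = ((0:Nat):Int) from rfl, PySem.List.pyGetD_natCast]
      rfl
  rw [h0', PySem.List.pyGetD_eq_getElem L [] h0 h1]
  exact hall _ (List.getElem_mem _)

theorem pv_helper_eq (L : List (List Int)) (r c : Int)
    (hpre : Pre_getAdjacentVals L)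
    (hr : 0 ≤ r ∧ r < (L.length : Int))
    (hc : 0 ≤ c ∧ c < ((PySem.List.pyGetD L 0 []).length : Int)) :
    getAdjacentValsHelper L r c = PySem.Set.ofList (pvNbrs L r c) := by
  obtain ⟨hr0, hr1⟩ := hr
  obtain ⟨hc0, hc1⟩ := hc
  have hlr := pv_rowlen L hpre r hr0 hr1
  simp only [pvNbrs]
  rw [pv_left _ _ _ hc0 hc1 (by omega), pv_right _ _ _ hc0 hc1 (by omega)]
  by_cases h1 : 0 < r <;> by_cases h2 : r + 1 < (L.length : Int)
  · rw [if_pos h1, if_pos h2,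
      pv_win _ _ _ hc0 hc1 (by have := pv_rowlen L hpre (r-1) (by omega) (by omega); omega),
      pv_win _ _ _ hc0 hc1 (by have := pv_rowlen L hpre (r+1) (by omega) (by omega); omega)]
    simp only [getAdjacentValsHelper, List.foldl]
    by_cases h3 : 0 < c <;> by_cases h4 : c + 1 < ((PySem.List.pyGetD L 0 []).length : Int) <;>
      simp only [h3, h4, if_true, if_false] <;>
      (repeat (first | rw [if_pos (by omega)] | rw [if_neg (by omega)])) <;>
      simp [PySem.Set.ofList, PySem.Set.empty, List.foldl] <;> ring_nf
  · rw [if_pos h1, if_neg h2,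
      pv_win _ _ _ hc0 hc1 (by have := pv_rowlen L hpre (r-1) (by omega) (by omega); omega)]
    simp only [getAdjacentValsHelper, List.foldl]
    by_cases h3 : 0 < c <;> by_cases h4 : c + 1 < ((PySem.List.pyGetD L 0 []).length : Int) <;>
      simp only [h3, h4, if_true, if_false] <;>
      (repeat (first | rw [if_pos (by omega)] | rw [if_neg (by omega)])) <;>
      simp [PySem.Set.ofList, PySem.Set.empty, List.foldl] <;> ring_nf
  · rw [if_neg h1, if_pos h2,
      pv_win _ _ _ hc0 hc1 (by have := pv_rowlen L hpre (r+1) (by omega) (by omega); omega)]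
    simp only [getAdjacentValsHelper, List.foldl]
    by_cases h3 : 0 < c <;> by_cases h4 : c + 1 < ((PySem.List.pyGetD L 0 []).length : Int) <;>
      simp only [h3, h4, if_true, if_false] <;>
      (repeat (first | rw [if_pos (by omega)] | rw [if_neg (by omega)])) <;>
      simp [PySem.Set.ofList, PySem.Set.empty, List.foldl] <;> ring_nf
  · rw [if_neg h1, if_neg h2]
    simp only [getAdjacentValsHelper, List.foldl]
    by_cases h3 : 0 < c <;> by_cases h4 : c + 1 < ((PySem.List.pyGetD L 0 []).length : Int) <;>
      simp only [h3, h4, if_true, if_false] <;>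
      (repeat (first | rw [if_pos (by omega)] | rw [if_neg (by omega)])) <;>
      simp [PySem.Set.ofList, PySem.Set.empty, List.foldl] <;> ring_nf

theorem pv_foldl_add_ofList (s : PySem.Set Int) (l : List Int) :
    List.foldl PySem.Set.add s (PySem.Set.ofList l) = PySem.Set.update s l := by
  show PySem.Set.update s (PySem.Set.ofList l) = PySem.Set.update s l
  rw [PySem.Set.update_eq_append_filter, PySem.Set.update_eq_append_filter,
    PySem.Set.ofList_ofList]

theorem pv_step_eq (d : PySem.Dict Int (PySem.Set Int)) (num : Int) (nbrs : List Int) :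
    (if d.contains num then
        d.modify num PySem.Set.empty (fun s => (PySem.Set.ofList nbrs).foldl PySem.Set.add s)
      else d.insert num (PySem.Set.ofList nbrs)) =
    (d.setdefault num PySem.Set.empty).modify num PySem.Set.empty
      (fun s => PySem.Set.update s nbrs) := by
  by_cases h : d.contains num
  · rw [if_pos h, PySem.Dict.setdefault_of_contains d PySem.Set.empty h]
    simp only [pv_foldl_add_ofList]
  · rw [if_neg h, PySem.Dict.setdefault_of_not_contains d PySem.Set.empty (by simpa using h)]
    simp only [PySem.Dict.modify, PySem.Dict.getD_insert_self, PySem.Dict.insert_insert_self]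
    rw [show PySem.Set.update PySem.Set.empty nbrs = PySem.Set.ofList nbrs from
      PySem.Set.update_nil_left nbrs]

theorem pv_rows3 (L : List (List Int)) :
    ((none :: L.map some).zip L).zip ((L.drop 1).map some ++ [none]) =
      (PySem.List.pyRange 0 (L.length : Int) 1).map (fun r =>
        (((if r = (0:Int) then none else some (PySem.List.pyGetD L (r-1) [])),
            PySem.List.pyGetD L r []),
          if r + 1 < (L.length : Int) then some (PySem.List.pyGetD L (r+1) []) else none)) := by
  have hL : (((none :: L.map some).zip L).zip ((L.drop 1).map some ++ [none])).length
      = L.length := by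
    simp [List.length_zip]
    omega
  apply List.ext_getElem
  · rw [hL]
    simp [PySem.List.length_pyRange_one]
  · intro i h1 h2
    have hi : i < L.length := hL ▸ h1
    simp only [List.getElem_zip, List.getElem_map, PySem.List.pyRange_one, List.getElem_range,
      zero_add]
    refine Prod.ext (Prod.ext ?_ ?_) ?_
    · show (none :: L.map some)[i]'(by simp; omega) = _
      rcases i with _ | j
      · simp
      · simp only [List.getElem_cons_succ, List.getElem_map]
        rw [if_neg (by omega), show (↑(j+1):Int) - 1 = ↑j from by push_cast; ring,
          PySem.List.pyGetD_natCast, List.getD_eq_getElem _ _ (by omega)]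
    · show L[i]'hi = _
      rw [PySem.List.pyGetD_natCast, List.getD_eq_getElem _ _ (by omega)]
    · show ((L.drop 1).map some ++ [none])[i]'(by simp; omega) = _
      by_cases hlast : i + 1 < L.length
      · rw [List.getElem_append_left (by simp; omega)]
        simp only [List.getElem_map, List.getElem_drop]
        rw [if_pos (by omega), show (↑i:Int) + 1 = ↑(i+1) from by push_cast; ring,
          PySem.List.pyGetD_natCast, List.getD_eq_getElem _ _ (by omega)]
        simp [show 1 + i = i + 1 from by omega]
      · rw [List.getElem_append_right (by simp; omega),
          if_neg (show ¬((↑i:Int) + 1 < (L.length:Int)) from by omega)]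
        simp


theorem pv_take_get (xs : List Int) (n : Nat) (c : Int) (h0 : 0 ≤ c) (h1 : c < (n : Int))
    (h2 : n ≤ xs.length) :
    PySem.List.pyGetD (List.take n xs) c 0 = PySem.List.pyGetD xs c 0 := by
  rw [PySem.List.pyGetD_eq_getElem _ _ h0 (by simp; omega),
    PySem.List.pyGetD_eq_getElem _ _ h0 (by omega), List.getElem_take]

-- ===== VERDICT (by name: the statement is the Claim_ definition above) =====
theorem getAdjacentVals_spec : Claim_equal_getAdjacentVals := by
  intro L _ hpre
  show getAdjacentVals L = getAdjacentVals_alt L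
  simp only [getAdjacentVals, getAdjacentVals_alt]
  apply congrArg PySem.Dict.items
  rw [pv_rows3, List.foldl_map]
  refine PySem.List.foldl_congr_mem _ _ _ _ ?_
  intro acc r hrmem
  rw [PySem.List.mem_pyRange_one] at hrmem
  have hlr := pv_rowlen L hpre r hrmem.1 hrmem.2
  rw [PySem.List.slice_to _ (by positivity),
    PySem.List.enumerate_eq_map_pyRange _ (0:Int), List.foldl_map]
  have hlen : ((PySem.List.len (List.take ((PySem.List.pyGetD L 0 []).length : Int).toNat
      (PySem.List.pyGetD L r []))) : Int) = ((PySem.List.pyGetD L 0 []).length : Int) := by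
    simp [PySem.List.len]
    omega
  rw [hlen]
  refine PySem.List.foldl_congr_mem _ _ _ _ ?_
  intro acc2 c hcmem
  rw [PySem.List.mem_pyRange_one] at hcmem
  simp only
  rw [pv_take_get _ _ _ hcmem.1 (by simpa using hcmem.2) (by omega),
    pv_helper_eq L r c hpre hrmem hcmem, pv_step_eq]
  by_cases hr0 : r = 0
  · subst hr0
    simp only [pvNbrs, if_neg (by omega : ¬ (0:Int) < 0)]
    by_cases h2 : 1 < L.length <;> simp [h2]
  · rw [if_neg hr0]
    simp only [pvNbrs, if_pos (by omega : (0:Int) < r)]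
    by_cases h2 : r + 1 < (L.length : Int) <;> simp [h2]
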